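-- pv_equiv track=rewrite | github.com/ShwetanshuC/data-scraper | app/nav.py | _is_career_or_nonstaff
-- ===== SOURCE A (Python) =====
-- def _is_career_or_nonstaff(s: str) -> bool:
--     """Return True if the string clearly refers to careers/join/apply type pages."""
--     if not s:
--         return False
--     t = s.strip().lower()
--     if not t:
--         return False
--     bad = (
--         "career", "careers", "employment", "job", "jobs", "hiring", "apply", "application", "opportunit",
--         "join our team", "join-our-team", "work with us", "work-with-us", "volunteer", "internship", "residency", "fellowship",
--     )
--     return any(b in t for b in bad)
-- ===== SOURCE B (Python) =====
-- # Keywords grouped by first letter: at each position of the normalized string we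
-- # look up its character and only test the tails of the keywords that start with it.
-- _BY_FIRST = {
--     "c": ("areer", "areers"),
--     "e": ("mployment",),
--     "j": ("ob", "obs", "oin our team", "oin-our-team"),
--     "h": ("iring",),
--     "a": ("pply", "pplication"),
--     "o": ("pportunit",),
--     "w": ("ork with us", "ork-with-us"),
--     "v": ("olunteer",),
--     "i": ("nternship",),
--     "r": ("esidency",),
--     "f": ("ellowship",),
-- }
--
-- def _is_career_or_nonstaff(s: str) -> bool:
--     """Return True if the string clearly refers to careers/join/apply type pages."""
--     if not s:
--         return False
--     t = s.strip().lower()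
--     if not t:
--         return False
--     for i, c in enumerate(t):
--         for tail in _BY_FIRST.get(c, ()):
--             if t.startswith(tail, i + 1):
--                 return True
--     return False
-- ===== Notes on version B (the rewrite author's own statement) =====
-- stated objective: alternative
-- what changed: A runs a separate substring-containment scan of t for every keyword in a flat tuple; B pre-groups the keywords into a dict keyed by their first letter and makes a single left-to-right pass over t, at each position looking up the current character and testing only the tails of the keywords that start with it.
import Mathlib
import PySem

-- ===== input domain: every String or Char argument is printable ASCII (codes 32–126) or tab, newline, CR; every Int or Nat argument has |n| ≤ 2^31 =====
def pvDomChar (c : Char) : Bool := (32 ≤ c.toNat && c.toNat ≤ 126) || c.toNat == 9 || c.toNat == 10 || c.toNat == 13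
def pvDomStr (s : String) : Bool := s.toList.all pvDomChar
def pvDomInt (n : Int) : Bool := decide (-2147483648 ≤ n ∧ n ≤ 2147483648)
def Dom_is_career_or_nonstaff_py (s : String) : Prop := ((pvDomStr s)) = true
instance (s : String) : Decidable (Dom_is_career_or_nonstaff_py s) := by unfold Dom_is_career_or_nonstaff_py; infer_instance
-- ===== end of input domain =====

-- B replaces A's per-keyword substring scans with a first-letter index: one pass over the
-- positions of the normalized string, looking the current character up in a dict that maps
-- each keyword's first letter to the tails of the keywords starting with it (objective: alternative).

-- ===== PORT A =====
-- A's tuple 'bad' of keywords (string literals written as their character lists)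
def kwsA : List (List Char) :=
  [['c', 'a', 'r', 'e', 'e', 'r'],
   ['c', 'a', 'r', 'e', 'e', 'r', 's'],
   ['e', 'm', 'p', 'l', 'o', 'y', 'm', 'e', 'n', 't'],
   ['j', 'o', 'b'],
   ['j', 'o', 'b', 's'],
   ['h', 'i', 'r', 'i', 'n', 'g'],
   ['a', 'p', 'p', 'l', 'y'],
   ['a', 'p', 'p', 'l', 'i', 'c', 'a', 't', 'i', 'o', 'n'],
   ['o', 'p', 'p', 'o', 'r', 't', 'u', 'n', 'i', 't'],
   ['j', 'o', 'i', 'n', ' ', 'o', 'u', 'r', ' ', 't', 'e', 'a', 'm'],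
   ['j', 'o', 'i', 'n', '-', 'o', 'u', 'r', '-', 't', 'e', 'a', 'm'],
   ['w', 'o', 'r', 'k', ' ', 'w', 'i', 't', 'h', ' ', 'u', 's'],
   ['w', 'o', 'r', 'k', '-', 'w', 'i', 't', 'h', '-', 'u', 's'],
   ['v', 'o', 'l', 'u', 'n', 't', 'e', 'e', 'r'],
   ['i', 'n', 't', 'e', 'r', 'n', 's', 'h', 'i', 'p'],
   ['r', 'e', 's', 'i', 'd', 'e', 'n', 'c', 'y'],
   ['f', 'e', 'l', 'l', 'o', 'w', 's', 'h', 'i', 'p']]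

def is_career_or_nonstaff_py (s : String) : Bool :=
  if s.toList = [] then false
  else
    let t := PySem.Chars.lower (PySem.Chars.strip s.toList)
    if t = [] then false
    else kwsA.any (fun b => PySem.Chars.isIn b t)

-- ===== PORT B =====
-- B's module-level _BY_FIRST dict: first letter ↦ tails of the keywords starting with it
def byFirst : PySem.Dict Char (List (List Char)) :=
  PySem.Dict.ofList
    [('c', [['a', 'r', 'e', 'e', 'r'], ['a', 'r', 'e', 'e', 'r', 's']]),
     ('e', [['m', 'p', 'l', 'o', 'y', 'm', 'e', 'n', 't']]),
     ('j', [['o', 'b'], ['o', 'b', 's'], ['o', 'i', 'n', ' ', 'o', 'u', 'r', ' ', 't', 'e', 'a', 'm'], ['o', 'i', 'n', '-', 'o', 'u', 'r', '-', 't', 'e', 'a', 'm']]),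
     ('h', [['i', 'r', 'i', 'n', 'g']]),
     ('a', [['p', 'p', 'l', 'y'], ['p', 'p', 'l', 'i', 'c', 'a', 't', 'i', 'o', 'n']]),
     ('o', [['p', 'p', 'o', 'r', 't', 'u', 'n', 'i', 't']]),
     ('w', [['o', 'r', 'k', ' ', 'w', 'i', 't', 'h', ' ', 'u', 's'], ['o', 'r', 'k', '-', 'w', 'i', 't', 'h', '-', 'u', 's']]),
     ('v', [['o', 'l', 'u', 'n', 't', 'e', 'e', 'r']]),
     ('i', [['n', 't', 'e', 'r', 'n', 's', 'h', 'i', 'p']]),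
     ('r', [['e', 's', 'i', 'd', 'e', 'n', 'c', 'y']]),
     ('f', [['e', 'l', 'l', 'o', 'w', 's', 'h', 'i', 'p']])]

-- 'for i, c in enumerate(t): for tail in _BY_FIRST.get(c, ()): if t.startswith(tail, i+1)':
-- walk t; at each character look its tails up and test each against the rest of the string.
def scanB : List Char → Bool
  | [] => false
  | c :: rest =>
      ((PySem.Dict.getD byFirst c []).any fun tail => PySem.Chars.startswith rest tail)
        || scanB rest

def is_career_or_nonstaff_py_alt (s : String) : Bool :=
  if s.toList = [] then false
  else
    let t := PySem.Chars.lower (PySem.Chars.strip s.toList)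
    if t = [] then false
    else scanB t

-- ===== PRECONDITION & SPEC =====
def Spec_is_career_or_nonstaff_py (s : String) (out : Bool) : Prop := out = is_career_or_nonstaff_py_alt s
instance (s : String) (out : Bool) : Decidable (Spec_is_career_or_nonstaff_py s out) := by unfold Spec_is_career_or_nonstaff_py; infer_instance

-- ===== CLAIM (what is proved, stated in full; the proofs are below) =====
def Claim_equal_is_career_or_nonstaff_py : Prop := ∀ (s : String), Dom_is_career_or_nonstaff_py s → Spec_is_career_or_nonstaff_py s (is_career_or_nonstaff_py s)

-- ===== LEMMAS AND PROOFS =====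

-- one step of B's scan: the first-letter lookup at c hits iff some full keyword is a prefix of c :: rest
theorem step_iff (c : Char) (rest : List Char) :
    ((PySem.Dict.getD byFirst c []).any fun tail => PySem.Chars.startswith rest tail) = true
    ↔ ∃ b ∈ kwsA, b <+: (c :: rest) := by
  by_cases h1 : c = 'c'
  · subst h1
    rw [show PySem.Dict.getD byFirst 'c' [] = [['a','r','e','e','r'], ['a','r','e','e','r','s']] from rfl]
    simp [kwsA, PySem.Chars.startswith_iff, List.cons_prefix_cons]
  by_cases h2 : c = 'e'
  · subst h2
    rw [show PySem.Dict.getD byFirst 'e' [] = [['m','p','l','o','y','m','e','n','t']] from rfl]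
    simp [kwsA, PySem.Chars.startswith_iff, List.cons_prefix_cons]
  by_cases h3 : c = 'j'
  · subst h3
    rw [show PySem.Dict.getD byFirst 'j' []
        = [['o','b'], ['o','b','s'], ['o','i','n',' ','o','u','r',' ','t','e','a','m'],
           ['o','i','n','-','o','u','r','-','t','e','a','m']] from rfl]
    simp [kwsA, PySem.Chars.startswith_iff, List.cons_prefix_cons]
  by_cases h4 : c = 'h'
  · subst h4
    rw [show PySem.Dict.getD byFirst 'h' [] = [['i','r','i','n','g']] from rfl]
    simp [kwsA, PySem.Chars.startswith_iff, List.cons_prefix_cons]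
  by_cases h5 : c = 'a'
  · subst h5
    rw [show PySem.Dict.getD byFirst 'a' []
        = [['p','p','l','y'], ['p','p','l','i','c','a','t','i','o','n']] from rfl]
    simp [kwsA, PySem.Chars.startswith_iff, List.cons_prefix_cons]
  by_cases h6 : c = 'o'
  · subst h6
    rw [show PySem.Dict.getD byFirst 'o' [] = [['p','p','o','r','t','u','n','i','t']] from rfl]
    simp [kwsA, PySem.Chars.startswith_iff, List.cons_prefix_cons]
  by_cases h7 : c = 'w'
  · subst h7
    rw [show PySem.Dict.getD byFirst 'w' []
        = [['o','r','k',' ','w','i','t','h',' ','u','s'], ['o','r','k','-','w','i','t','h','-','u','s']] from rfl]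
    simp [kwsA, PySem.Chars.startswith_iff, List.cons_prefix_cons]
  by_cases h8 : c = 'v'
  · subst h8
    rw [show PySem.Dict.getD byFirst 'v' [] = [['o','l','u','n','t','e','e','r']] from rfl]
    simp [kwsA, PySem.Chars.startswith_iff, List.cons_prefix_cons]
  by_cases h9 : c = 'i'
  · subst h9
    rw [show PySem.Dict.getD byFirst 'i' [] = [['n','t','e','r','n','s','h','i','p']] from rfl]
    simp [kwsA, PySem.Chars.startswith_iff, List.cons_prefix_cons]
  by_cases h10 : c = 'r'
  · subst h10
    rw [show PySem.Dict.getD byFirst 'r' [] = [['e','s','i','d','e','n','c','y']] from rfl]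
    simp [kwsA, PySem.Chars.startswith_iff, List.cons_prefix_cons]
  by_cases h11 : c = 'f'
  · subst h11
    rw [show PySem.Dict.getD byFirst 'f' [] = [['e','l','l','o','w','s','h','i','p']] from rfl]
    simp [kwsA, PySem.Chars.startswith_iff, List.cons_prefix_cons]
  -- c is none of the keywords' first letters: the lookup misses and no keyword is a prefix
  have hm : byFirst = PySem.Dict.mk
      [('c', [['a', 'r', 'e', 'e', 'r'], ['a', 'r', 'e', 'e', 'r', 's']]),
       ('e', [['m', 'p', 'l', 'o', 'y', 'm', 'e', 'n', 't']]),
       ('j', [['o', 'b'], ['o', 'b', 's'], ['o', 'i', 'n', ' ', 'o', 'u', 'r', ' ', 't', 'e', 'a', 'm'], ['o', 'i', 'n', '-', 'o', 'u', 'r', '-', 't', 'e', 'a', 'm']]),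
       ('h', [['i', 'r', 'i', 'n', 'g']]),
       ('a', [['p', 'p', 'l', 'y'], ['p', 'p', 'l', 'i', 'c', 'a', 't', 'i', 'o', 'n']]),
       ('o', [['p', 'p', 'o', 'r', 't', 'u', 'n', 'i', 't']]),
       ('w', [['o', 'r', 'k', ' ', 'w', 'i', 't', 'h', ' ', 'u', 's'], ['o', 'r', 'k', '-', 'w', 'i', 't', 'h', '-', 'u', 's']]),
       ('v', [['o', 'l', 'u', 'n', 't', 'e', 'e', 'r']]),
       ('i', [['n', 't', 'e', 'r', 'n', 's', 'h', 'i', 'p']]),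
       ('r', [['e', 's', 'i', 'd', 'e', 'n', 'c', 'y']]),
       ('f', [['e', 'l', 'l', 'o', 'w', 's', 'h', 'i', 'p']])] := rfl
  have hc : byFirst.contains c = false := by
    rw [hm, PySem.Dict.contains_mk]
    simp [Ne.symm h1, Ne.symm h2, Ne.symm h3, Ne.symm h4, Ne.symm h5,
      Ne.symm h6, Ne.symm h7, Ne.symm h8, Ne.symm h9, Ne.symm h10, Ne.symm h11]
  rw [PySem.Dict.getD_of_not_contains _ _ hc]
  simp [kwsA, List.cons_prefix_cons, Ne.symm h1, Ne.symm h2, Ne.symm h3, Ne.symm h4,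
    Ne.symm h5, Ne.symm h6, Ne.symm h7, Ne.symm h8, Ne.symm h9, Ne.symm h10, Ne.symm h11]

-- B's scan hits iff some keyword is a prefix of some suffix of t
theorem scanB_iff (t : List Char) :
    scanB t = true ↔ ∃ j, ∃ b ∈ kwsA, b <+: t.drop j := by
  induction t with
  | nil =>
      simp only [scanB]
      constructor
      · intro h; cases h
      · rintro ⟨j, b, hbmem, hpre⟩
        simp only [List.drop_nil] at hpre
        have hb : b = [] := List.prefix_nil.mp hpre
        subst hb
        exact absurd hbmem (by decide)
  | cons c rest ih =>
      simp only [scanB, Bool.or_eq_true, step_iff, ih]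
      constructor
      · rintro (⟨b, hbmem, hpre⟩ | ⟨j, b, hbmem, hpre⟩)
        · exact ⟨0, b, hbmem, by simpa using hpre⟩
        · exact ⟨j + 1, b, hbmem, by simpa using hpre⟩
      · rintro ⟨j, b, hbmem, hpre⟩
        cases j with
        | zero => exact Or.inl ⟨b, hbmem, by simpa using hpre⟩
        | succ j => exact Or.inr ⟨j, b, hbmem, by simpa using hpre⟩

theorem main_eq (t : List Char) :
    kwsA.any (fun b => PySem.Chars.isIn b t) = scanB t := by
  rw [Bool.eq_iff_iff, scanB_iff t]
  simp only [List.any_eq_true]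
  constructor
  · rintro ⟨b, hb, hin⟩
    obtain ⟨j, hpre⟩ := (PySem.Chars.exists_prefix_drop_iff_isIn b t).mpr hin
    exact ⟨j, b, hb, hpre⟩
  · rintro ⟨j, b, hb, hpre⟩
    exact ⟨b, hb, (PySem.Chars.exists_prefix_drop_iff_isIn b t).mp ⟨j, hpre⟩⟩

-- ===== VERDICT (by name: the statement is the Claim_ definition above) =====
theorem is_career_or_nonstaff_py_spec : Claim_equal_is_career_or_nonstaff_py := by
  intro s _
  unfold Spec_is_career_or_nonstaff_py is_career_or_nonstaff_py is_career_or_nonstaff_py_alt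
  simp only [main_eq]
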